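-- pv_equiv track=rewrite | github.com/Kush134/Gyaansetu | GyaanSetuAPI/GyaanSetuAPI.py | sort_urls_by_priority
-- ===== SOURCE A (Python) =====
-- def sort_urls_by_priority(urls, priority_keywords, ignore_keywords):
--     # Assign a priority level based on the index of the first priority keyword in the URL
--     priority_levels = [len(priority_keywords) + 1 for url in urls]
--     # list of tuples where each tuple consists of the URL and its priority level
--     url_priority_pairs = []
--     for i, url in enumerate(urls):
--         if not any(keyword in url for keyword in ignore_keywords):
--             # only add the URL to the list if it does not contain any of the ignore keywords
--             for j, keyword in enumerate(priority_keywords):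
--                 if keyword in url:
--                     priority_levels[i] = j
--                     break
--             url_priority_pairs.append((url, priority_levels[i]))
--
--     # Sort the list of tuples by the priority level (second element in the tuple) in ascending order
--     sorted_url_priority_pairs = sorted(url_priority_pairs, key=lambda x: x[1])
--
--     # Extract the URLs from the sorted list of tuples and return them as a new list
--     return [pair[0] for pair in sorted_url_priority_pairs]
-- ===== SOURCE B (Python) =====
-- def sort_urls_by_priority(urls, priority_keywords, ignore_keywords):
--     # Distribution (bucket) sort: one pass over urls; bucket index = first matching
--     # priority keyword, default len(priority_keywords) + 1; concatenate buckets.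
--     n = len(priority_keywords)
--     buckets = [[] for _ in range(n + 2)]
--     for url in urls:
--         if any(kw in url for kw in ignore_keywords):
--             continue
--         level = n + 1
--         for j, kw in enumerate(priority_keywords):
--             if kw in url:
--                 level = j
--                 break
--         buckets[level].append(url)
--     return [url for bucket in buckets for url in bucket]
-- ===== Notes on version B (the rewrite author's own statement) =====
-- stated objective: alternative
-- what changed: Replaces building (url, level) pairs plus a stable comparison sort and final projection with a single-pass distribution into len(priority_keywords)+2 buckets concatenated in level order.
import Mathlib
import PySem

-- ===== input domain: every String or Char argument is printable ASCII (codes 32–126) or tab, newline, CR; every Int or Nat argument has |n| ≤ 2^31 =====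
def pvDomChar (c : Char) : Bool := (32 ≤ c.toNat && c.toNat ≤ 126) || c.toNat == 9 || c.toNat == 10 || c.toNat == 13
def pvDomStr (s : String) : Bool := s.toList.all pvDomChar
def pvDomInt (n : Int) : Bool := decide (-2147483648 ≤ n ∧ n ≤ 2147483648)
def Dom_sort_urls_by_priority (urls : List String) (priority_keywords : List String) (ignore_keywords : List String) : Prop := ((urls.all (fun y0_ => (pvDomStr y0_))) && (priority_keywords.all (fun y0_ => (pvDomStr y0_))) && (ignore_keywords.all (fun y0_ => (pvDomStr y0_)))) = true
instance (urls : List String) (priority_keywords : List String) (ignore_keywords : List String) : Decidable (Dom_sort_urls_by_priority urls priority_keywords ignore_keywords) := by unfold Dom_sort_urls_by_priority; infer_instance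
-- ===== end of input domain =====

-- B replaces A's pair-building + stable comparison sort + projection by a single-pass
-- distribution into len(priority_keywords)+2 level buckets concatenated in order (alternative decomposition).

-- ===== PORT A =====
-- inner 'for j, keyword in enumerate(priority_keywords): if keyword in url: … break'
def pyFirstKw : List (Int × String) → String → Option Int
  | [], _ => none
  | (j, kw) :: rest, url => if PySem.Str.isIn kw url then some j else pyFirstKw rest url

-- body of 'for i, url in enumerate(urls)': state = (priority_levels, url_priority_pairs)
def aStep (priority_keywords ignore_keywords : List String)
    (st : List Int × List (String × Int)) (p : Int × String) : List Int × List (String × Int) :=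
  if !(ignore_keywords.any (fun kw => PySem.Str.isIn kw p.2)) then
    let levels' := match pyFirstKw (PySem.List.enumerate priority_keywords 0) p.2 with
      | some j => PySem.List.pySetD st.1 p.1 j
      | none => st.1
    (levels', st.2 ++ [(p.2, PySem.List.pyGetD levels' p.1 0)])
  else st

def sort_urls_by_priority (urls : List String) (priority_keywords : List String) (ignore_keywords : List String) : List String :=
  let priority_levels : List Int := urls.map (fun _ => (priority_keywords.length : Int) + 1)
  let pairs := ((PySem.List.enumerate urls 0).foldl (aStep priority_keywords ignore_keywords) (priority_levels, [])).2
  (PySem.List.sorted pairs (fun p => p.2)).map (fun p => p.1)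

-- ===== PORT B =====
-- 'level = n + 1; for j, kw in enumerate(priority_keywords): if kw in url: level = j; break'
def bFirstKw : List (Int × String) → String → Int → Int
  | [], _, lvl => lvl
  | (j, kw) :: rest, url, lvl => if PySem.Str.isIn kw url then j else bFirstKw rest url lvl

-- loop body: skip ignored urls, append url to its level's bucket
def bStep (priority_keywords ignore_keywords : List String)
    (buckets : List (List String)) (url : String) : List (List String) :=
  if ignore_keywords.any (fun kw => PySem.Str.isIn kw url) then buckets
  else
    let level := bFirstKw (PySem.List.enumerate priority_keywords 0) url ((priority_keywords.length : Int) + 1)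
    PySem.List.pySetD buckets level (PySem.List.pyGetD buckets level [] ++ [url])

def sort_urls_by_priority_alt (urls : List String) (priority_keywords : List String) (ignore_keywords : List String) : List String :=
  let buckets := urls.foldl (bStep priority_keywords ignore_keywords)
    (List.replicate (priority_keywords.length + 2) [])
  buckets.flatten

-- ===== PRECONDITION & SPEC =====
def Spec_sort_urls_by_priority (urls : List String) (priority_keywords : List String) (ignore_keywords : List String) (out : List String) : Prop := out = sort_urls_by_priority_alt urls priority_keywords ignore_keywords
instance (urls : List String) (priority_keywords : List String) (ignore_keywords : List String) (out : List String) : Decidable (Spec_sort_urls_by_priority urls priority_keywords ignore_keywords out) := by unfold Spec_sort_urls_by_priority; infer_instance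

-- ===== CLAIM (what is proved, stated in full; the proofs are below) =====
def Claim_equal_sort_urls_by_priority : Prop := ∀ (urls : List String) (priority_keywords : List String) (ignore_keywords : List String), Dom_sort_urls_by_priority urls priority_keywords ignore_keywords → Spec_sort_urls_by_priority urls priority_keywords ignore_keywords (sort_urls_by_priority urls priority_keywords ignore_keywords)

-- ===== LEMMAS AND PROOFS =====

def ignoredB (ignore_keywords : List String) (url : String) : Bool :=
  ignore_keywords.any (fun kw => PySem.Str.isIn kw url)

def lvlI (priority_keywords : List String) (url : String) : Int :=
  bFirstKw (PySem.List.enumerate priority_keywords 0) url ((priority_keywords.length : Int) + 1)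

def nlvl (priority_keywords : List String) (url : String) : Nat :=
  (lvlI priority_keywords url).toNat

theorem bFirst_eq_getD (lst : List (Int × String)) (url : String) (d : Int) :
    bFirstKw lst url d = (pyFirstKw lst url).getD d := by
  induction lst with
  | nil => rfl
  | cons p rest ih =>
    obtain ⟨j, kw⟩ := p
    by_cases h : PySem.Chars.isIn kw.toList url.toList <;> simp [bFirstKw, pyFirstKw, PySem.Str.isIn, h, ih]

theorem bFirst_cases (lst : List (Int × String)) (url : String) (d : Int) :
    bFirstKw lst url d = d ∨ ∃ p ∈ lst, bFirstKw lst url d = p.1 := by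
  induction lst with
  | nil => left; rfl
  | cons p rest ih =>
    obtain ⟨j, kw⟩ := p
    by_cases h : PySem.Chars.isIn kw.toList url.toList
    · right; exact ⟨(j, kw), by simp, by simp [bFirstKw, PySem.Str.isIn, h]⟩
    · rcases ih with h1 | ⟨q, hq, hq2⟩
      · left; simp [bFirstKw, PySem.Str.isIn, h, h1]
      · right; exact ⟨q, by simp [hq], by simp [bFirstKw, PySem.Str.isIn, h, hq2]⟩

theorem lvl_bounds (pks : List String) (url : String) :
    0 ≤ lvlI pks url ∧ lvlI pks url < (pks.length : Int) + 2 := by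
  unfold lvlI
  rcases bFirst_cases (PySem.List.enumerate pks 0) url ((pks.length : Int) + 1) with h | ⟨p, hp, h⟩
  · rw [h]; constructor <;> omega
  · rw [PySem.List.mem_enumerate_iff] at hp
    obtain ⟨k, hk, rfl⟩ := hp
    simp only [h]
    constructor <;> [omega; push_cast] <;> omega

theorem lvl_toNat (pks : List String) (url : String) :
    ((nlvl pks url : Nat) : Int) = lvlI pks url :=
  Int.toNat_of_nonneg (lvl_bounds pks url).1

theorem nlvl_lt (pks : List String) (url : String) : nlvl pks url < pks.length + 2 := by
  have h1 := (lvl_bounds pks url).2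
  have h2 := lvl_toNat pks url
  omega

-- ===== A side: the fold computes the kept urls paired with their levels =====
theorem aLoop (pks iks : List String) :
    ∀ (urls : List String) (i0 : Nat) (levels : List Int) (pairs : List (String × Int)),
      (∀ k, i0 ≤ k → k < levels.length → levels[k]? = some ((pks.length : Int) + 1)) →
      i0 + urls.length ≤ levels.length →
      ((PySem.List.enumerate urls (i0 : Int)).foldl (aStep pks iks) (levels, pairs)).2
        = pairs ++ (urls.filter (fun u => !ignoredB iks u)).map (fun u => (u, lvlI pks u)) := by
  intro urls
  induction urls with
  | nil => intro i0 levels pairs _ _; simp [PySem.List.enumerate]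
  | cons u rest ih =>
    intro i0 levels pairs hinv hlen
    rw [PySem.List.enumerate_cons, List.foldl_cons]
    have hi0 : i0 < levels.length := by simp at hlen; omega
    by_cases hig : ignoredB iks u
    · have : aStep pks iks (levels, pairs) ((i0 : Int), u) = (levels, pairs) := by
        simp [aStep, ignoredB] at hig ⊢; exact hig
      rw [this]
      have : ((i0 : Int) + 1) = (((i0 + 1 : Nat)) : Int) := by push_cast; omega
      rw [this, ih (i0 + 1) levels pairs (fun k h1 h2 => hinv k (by omega) h2) (by simp at hlen ⊢; omega)]
      simp [List.filter_cons, hig]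
    · cases hfk : pyFirstKw (PySem.List.enumerate pks 0) u with
      | some j =>
        have hig' : ∀ x ∈ iks, PySem.Chars.isIn x.toList u.toList = false := by
          simpa [ignoredB, PySem.Str.isIn, List.any_eq_false] using hig
        have hstep : aStep pks iks (levels, pairs) ((i0 : Int), u)
            = (PySem.List.pySetD levels (i0 : Int) j, pairs ++ [(u, j)]) := by
          simp [aStep, hfk, PySem.Str.isIn, hi0, List.getElem?_set_self]
          exact hig'
        rw [hstep]
        have hlvl : lvlI pks u = j := by
          unfold lvlI; rw [bFirst_eq_getD, hfk]; rfl
        have hinv' : ∀ k, i0 + 1 ≤ k → k < (PySem.List.pySetD levels (i0 : Int) j).length →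
            (PySem.List.pySetD levels (i0 : Int) j)[k]? = some ((pks.length : Int) + 1) := by
          intro k h1 h2
          rw [PySem.List.length_pySetD] at h2
          rw [PySem.List.pySetD_natCast, List.getElem?_set_ne (by omega)]
          exact hinv k (by omega) h2
        have hcast : ((i0 : Int) + 1) = (((i0 + 1 : Nat)) : Int) := by push_cast; omega
        rw [hcast, ih (i0 + 1) _ _ hinv' (by rw [PySem.List.length_pySetD]; simp at hlen ⊢; omega)]
        simp [List.filter_cons, hig, hlvl]
      | none =>
        have hig' : ∀ x ∈ iks, PySem.Chars.isIn x.toList u.toList = false := by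
          simpa [ignoredB, PySem.Str.isIn, List.any_eq_false] using hig
        have hstep : aStep pks iks (levels, pairs) ((i0 : Int), u)
            = (levels, pairs ++ [(u, (pks.length : Int) + 1)]) := by
          simp [aStep, hfk, PySem.Str.isIn, hinv i0 (le_refl _) hi0]
          exact hig'
        rw [hstep]
        have hlvl : lvlI pks u = (pks.length : Int) + 1 := by
          unfold lvlI; rw [bFirst_eq_getD, hfk]; rfl
        have hcast : ((i0 : Int) + 1) = (((i0 + 1 : Nat)) : Int) := by push_cast; omega
        rw [hcast, ih (i0 + 1) levels _ (fun k h1 h2 => hinv k (by omega) h2) (by simp at hlen ⊢; omega)]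
        simp [List.filter_cons, hig, hlvl]

theorem A_eq (urls pks iks : List String) :
    sort_urls_by_priority urls pks iks
      = (PySem.List.sorted ((urls.filter (fun u => !ignoredB iks u)).map (fun u => (u, lvlI pks u)))
          (fun p => p.2)).map (fun p => p.1) := by
  simp only [sort_urls_by_priority]
  have h0 : ((0 : Int)) = ((0 : Nat) : Int) := rfl
  rw [h0, aLoop pks iks urls 0 (urls.map (fun _ => (pks.length : Int) + 1)) []
    (by
      intro k _ hk
      simp only [List.length_map] at hk
      simp [List.getElem?_replicate, hk])
    (by simp)]
  simp

-- ===== generic: stable sort of Int-keyed elements = bucket concatenation =====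
def bucketsOf {α : Type} (key : α → Int) (js : List Int) (ys : List α) : List α :=
  js.flatMap (fun j => ys.filter (fun y => key y == j))

theorem bucketsOf_cons {α : Type} (key : α → Int) (j : Int) (rest : List Int) (ys : List α) :
    bucketsOf key (j :: rest) ys = ys.filter (fun y => key y == j) ++ bucketsOf key rest ys := rfl

theorem insertBy_append_false {α : Type} (before : α → α → Bool) (x : α) (as bs : List α)
    (h : ∀ a ∈ as, before x a = false) :
    PySem.List.insertBy before x (as ++ bs) = as ++ PySem.List.insertBy before x bs := by
  induction as with
  | nil => simp
  | cons a t ih =>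
    have ha : before x a = false := h a (by simp)
    simp only [List.cons_append, PySem.List.insertBy, ha]
    simp [ih (fun a' ha' => h a' (by simp [ha']))]

theorem insertBy_all_true {α : Type} (before : α → α → Bool) (x : α) (l : List α)
    (h : ∀ a ∈ l, before x a = true) :
    PySem.List.insertBy before x l = x :: l := by
  cases l with
  | nil => rfl
  | cons a t => simp [PySem.List.insertBy, h a (by simp)]

theorem insertBy_buckets {α : Type} (key : α → Int) (js : List Int) (ys : List α) (x : α)
    (hjs : js.Pairwise (· < ·)) (hx : key x ∈ js) :
    PySem.List.insertBy (fun a b => decide (key a < key b)) x (bucketsOf key js ys)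
      = bucketsOf key js (ys ++ [x]) := by
  induction js with
  | nil => simp at hx
  | cons j rest ih =>
    rw [List.pairwise_cons] at hjs
    have hmemrest : ∀ a ∈ bucketsOf key rest ys, ∃ j' ∈ rest, key a = j' := by
      intro a ha
      unfold bucketsOf at ha
      rw [List.mem_flatMap] at ha
      obtain ⟨j', hj', ha'⟩ := ha
      rw [List.mem_filter] at ha'
      exact ⟨j', hj', by simpa using ha'.2⟩
    rw [bucketsOf_cons, bucketsOf_cons]
    rcases List.mem_cons.mp hx with hkj | hkrest
    · -- key x = j : skip bucket j, insert at its end (head of the rest)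
      rw [insertBy_append_false _ x _ _ (by
        intro a ha
        rw [List.mem_filter] at ha
        have : key a = j := by simpa using ha.2
        simp [this, hkj])]
      rw [insertBy_all_true _ x _ (by
        intro a ha
        obtain ⟨j', hj', hkey⟩ := hmemrest a ha
        have : j < j' := hjs.1 j' hj'
        simp [hkey, hkj]; omega)]
      have h1 : (ys ++ [x]).filter (fun y => key y == j) = ys.filter (fun y => key y == j) ++ [x] := by
        simp [List.filter_append, hkj]
      have h2 : bucketsOf key rest (ys ++ [x]) = bucketsOf key rest ys := by
        unfold bucketsOf
        apply List.flatMap_congr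
        intro j' hj'
        have hlt : j < j' := hjs.1 j' hj'
        rw [List.filter_append]
        have : ([x].filter (fun y => key y == j')) = [] := by
          simp [List.filter_cons, hkj]; omega
        rw [this, List.append_nil]
      rw [h1, h2]
      simp
    · -- j < key x : bucket j unchanged, recurse
      have hjlt : j < key x := by
        rcases hmemrest with _
        exact hjs.1 _ hkrest
      rw [insertBy_append_false _ x _ _ (by
        intro a ha
        rw [List.mem_filter] at ha
        have : key a = j := by simpa using ha.2
        simp [this]; omega)]
      rw [ih hjs.2 hkrest]
      have h1 : (ys ++ [x]).filter (fun y => key y == j) = ys.filter (fun y => key y == j) := by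
        rw [List.filter_append]
        have : ([x].filter (fun y => key y == j)) = [] := by
          simp [List.filter_cons]; omega
        rw [this, List.append_nil]
      rw [h1]

theorem sorted_buckets {α : Type} (key : α → Int) (js : List Int) (xs : List α)
    (hjs : js.Pairwise (· < ·)) (h : ∀ y ∈ xs, key y ∈ js) :
    PySem.List.sorted xs key = bucketsOf key js xs := by
  rw [PySem.List.sorted_eq_foldl_insertBy]
  induction xs using List.reverseRecOn with
  | nil => simp [bucketsOf]
  | append_singleton ys x ih =>
    rw [List.foldl_append, List.foldl_cons, List.foldl_nil,
      ih (fun y hy => h y (by simp [hy]))]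
    exact insertBy_buckets key js ys x hjs (h x (by simp))

-- ===== B side =====
def gB (pks iks : List String) (pref : List String) (k : Nat) : List String :=
  pref.filter (fun u => !ignoredB iks u && (nlvl pks u == k))

theorem set_map_range {β : Type} (m t : Nat) (g : Nat → β) (v : β) (ht : t < m) :
    ((List.range m).map g).set t v = (List.range m).map (fun k => if k = t then v else g k) := by
  apply List.ext_getElem
  · simp
  · intro i h1 h2
    simp only [List.length_set, List.length_map, List.length_range] at h1
    by_cases he : t = i
    · simp [List.getElem_set, List.getElem_map, List.getElem_range, he]
    · have he2 : ¬ i = t := fun h => he h.symm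
      simp [List.getElem_set, List.getElem_map, List.getElem_range, he, he2]

theorem gB_append (pks iks : List String) (pref : List String) (u : String) (k : Nat) :
    gB pks iks (pref ++ [u]) k
      = gB pks iks pref k ++ (if (!ignoredB iks u && (nlvl pks u == k)) then [u] else []) := by
  unfold gB
  rw [List.filter_append]
  simp [List.filter_cons]

theorem bLoop (pks iks : List String) :
    ∀ (urls pref : List String),
      urls.foldl (bStep pks iks) ((List.range (pks.length + 2)).map (gB pks iks pref))
        = (List.range (pks.length + 2)).map (gB pks iks (pref ++ urls)) := by
  intro urls
  induction urls with
  | nil => intro pref; simp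
  | cons u rest ih =>
    intro pref
    rw [List.foldl_cons]
    by_cases hig : ignoredB iks u
    · have hstep : bStep pks iks ((List.range (pks.length + 2)).map (gB pks iks pref)) u
          = (List.range (pks.length + 2)).map (gB pks iks (pref ++ [u])) := by
        unfold bStep
        simp only [ignoredB] at hig
        rw [if_pos hig]
        apply List.map_congr_left
        intro k _
        rw [gB_append]
        have hfalse : (!ignoredB iks u && (nlvl pks u == k)) = false := by
          unfold ignoredB; rw [hig]; rfl
        rw [hfalse]
        simp
      rw [hstep, ih (pref ++ [u])]
      simp
    · have ht := nlvl_lt pks u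
      have hstep : bStep pks iks ((List.range (pks.length + 2)).map (gB pks iks pref)) u
          = (List.range (pks.length + 2)).map (gB pks iks (pref ++ [u])) := by
        unfold bStep
        simp only [ignoredB] at hig
        rw [if_neg hig]
        have hlv : bFirstKw (PySem.List.enumerate pks 0) u ((pks.length : Int) + 1)
            = ((nlvl pks u : Nat) : Int) := (lvl_toNat pks u).symm
        rw [hlv, PySem.List.pySetD_natCast, PySem.List.pyGetD_natCast]
        rw [List.getD_eq_getElem _ _ (by simp [ht])]
        rw [List.getElem_map, List.getElem_range]
        rw [set_map_range _ _ _ _ ht]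
        apply List.map_congr_left
        intro k _
        rw [gB_append]
        have hnig : ignoredB iks u = false := by
          simp only [ignoredB]
          exact Bool.not_eq_true _ ▸ (by simpa using hig)
        by_cases hk : k = nlvl pks u
        · simp [hk, hnig]
        · simp [hk, hnig]
          omega
      rw [hstep, ih (pref ++ [u])]
      simp

theorem B_eq (urls pks iks : List String) :
    sort_urls_by_priority_alt urls pks iks
      = (List.range (pks.length + 2)).flatMap (gB pks iks urls) := by
  unfold sort_urls_by_priority_alt
  have hinit : List.replicate (pks.length + 2) ([] : List String)
      = (List.range (pks.length + 2)).map (gB pks iks []) := by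
    apply List.ext_getElem
    · simp
    · intro i h1 h2
      simp [List.getElem_replicate, gB]
  rw [hinit, bLoop pks iks urls [], List.nil_append, List.flatMap_def]

-- ===== putting it together =====
theorem main_eq (urls pks iks : List String) :
    sort_urls_by_priority urls pks iks = sort_urls_by_priority_alt urls pks iks := by
  rw [A_eq, B_eq]
  have hpair : (((List.range (pks.length + 2)).map (fun k : Nat => (k : Int)))).Pairwise (· < ·) := by
    rw [List.pairwise_map]
    exact List.pairwise_lt_range.imp (fun h => by exact_mod_cast h)
  have hmem : ∀ p ∈ (urls.filter (fun u => !ignoredB iks u)).map (fun u => (u, lvlI pks u)),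
      p.2 ∈ (List.range (pks.length + 2)).map (fun k : Nat => (k : Int)) := by
    intro p hp
    rw [List.mem_map] at hp
    obtain ⟨u, hu, rfl⟩ := hp
    rw [List.mem_map]
    exact ⟨nlvl pks u, by simp [nlvl_lt pks u], lvl_toNat pks u⟩
  have hsb := sorted_buckets (fun (p : String × Int) => p.2)
    ((List.range (pks.length + 2)).map (fun k : Nat => (k : Int)))
    ((urls.filter (fun u => !ignoredB iks u)).map (fun u => (u, lvlI pks u))) hpair hmem
  rw [hsb]
  unfold bucketsOf
  rw [List.map_flatMap, List.flatMap_map]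
  apply List.flatMap_congr
  intro k _
  rw [List.filter_map, List.map_map]
  have hid : ((fun (p : String × Int) => p.1) ∘ (fun u => (u, lvlI pks u))) = fun u => u := rfl
  rw [hid, List.map_id', List.filter_filter]
  unfold gB
  apply List.filter_congr
  intro u _
  simp only [Function.comp_apply]
  rw [← lvl_toNat pks u]
  by_cases h1 : nlvl pks u = k <;> by_cases h2 : ignoredB iks u <;> simp [h1, h2]

-- ===== VERDICT (by name: the statement is the Claim_ definition above) =====
theorem sort_urls_by_priority_spec : Claim_equal_sort_urls_by_priority := by
  intro urls pks iks _
  unfold Spec_sort_urls_by_priority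
  exact main_eq urls pks iks
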